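-- pv_equiv track=rewrite | github.com/kpetrovsky/kp-ripgrep-mcp | src/rgrep_mcp/ripgrep.py | _get_content_heading_context
-- ===== SOURCE A (Python) =====
-- from typing import Dict, List, Optional, Union, Any
--
-- def _get_content_heading_context(lines: List[str], line_num: int) -> Optional[str]:
--     """Get the heading context for a given line number in content."""
--     if not lines or line_num < 1 or line_num > len(lines):
--         return None
--
--     # Find the most recent heading before this line
--     for i in range(line_num - 1, -1, -1):  # Go backwards from target line
--         line = lines[i].strip()
--         if line.startswith('#'):
--             # Extract heading text (remove # symbols and strip)
--             heading_text = line.lstrip('#').strip()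
--             if heading_text:
--                 return heading_text
--
--     return None
-- ===== SOURCE B (Python) =====
-- from typing import List, Optional
--
-- def _get_content_heading_context(lines: List[str], line_num: int) -> Optional[str]:
--     """Forward scan keeping the last non-empty heading seen before line_num."""
--     if not lines or line_num < 1 or line_num > len(lines):
--         return None
--     result = None
--     for i in range(line_num):
--         s = lines[i].strip()
--         if s.startswith('#'):
--             text = s.lstrip('#').strip()
--             if text:
--                 result = text
--     return result
-- ===== Notes on version B (the rewrite author's own statement) =====
-- stated objective: alternative
-- what changed: Replaced A's backward early-return scan from line_num-1 down to 0 with a forward accumulate-last pass over the prefix, returning the last non-empty heading seen.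
import Mathlib
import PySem

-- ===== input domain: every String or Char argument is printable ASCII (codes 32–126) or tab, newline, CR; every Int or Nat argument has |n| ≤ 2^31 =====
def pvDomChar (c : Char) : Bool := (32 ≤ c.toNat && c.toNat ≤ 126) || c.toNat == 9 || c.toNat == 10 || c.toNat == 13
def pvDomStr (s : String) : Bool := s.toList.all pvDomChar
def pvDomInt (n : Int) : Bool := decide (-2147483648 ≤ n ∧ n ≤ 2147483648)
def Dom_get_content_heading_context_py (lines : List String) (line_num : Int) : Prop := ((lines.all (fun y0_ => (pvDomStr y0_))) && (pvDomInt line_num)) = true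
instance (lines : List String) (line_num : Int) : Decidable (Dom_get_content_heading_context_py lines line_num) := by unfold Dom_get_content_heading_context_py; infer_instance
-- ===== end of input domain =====

-- B replaces A's backward early-return scan with a forward accumulate-last scan; alternative decomposition, same cost.

-- ===== PORT A =====
-- backward loop: aGo lines k runs i = k-1, k-2, …, 0, returning the first non-empty heading found
def aGo (lines : List String) : Nat → Option String
  | 0 => none
  | k + 1 =>
    match PySem.List.pyGet? lines (k : Int) with
    | none => none   -- unreachable under the guard (0 ≤ k < lines.length)
    | some l0 =>
      let line := PySem.Str.strip l0
      if PySem.Str.startswith line "#" then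
        -- line.lstrip('#') hand-ported as dropping leading '#' chars (exact for this one-char set)
        let heading_text := PySem.Str.strip (String.mk (line.toList.dropWhile (· == '#')))
        if heading_text ≠ "" then some heading_text else aGo lines k
      else aGo lines k

def get_content_heading_context_py (lines : List String) (line_num : Int) : Option String :=
  if lines = [] ∨ line_num < 1 ∨ line_num > lines.length then none
  else aGo lines line_num.toNat

-- ===== PORT B =====
def get_content_heading_context_py_alt (lines : List String) (line_num : Int) : Option String :=
  if lines = [] ∨ line_num < 1 ∨ line_num > lines.length then none
  else
    (List.range line_num.toNat).foldl
      (fun result (i : Nat) =>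
        match PySem.List.pyGet? lines ((i : Nat) : Int) with
        | none => result   -- unreachable under the guard
        | some l0 =>
          let s := PySem.Str.strip l0
          if PySem.Str.startswith s "#" then
            -- s.lstrip('#') hand-ported as dropping leading '#' chars (exact for this one-char set)
            let text := PySem.Str.strip (String.mk (s.toList.dropWhile (· == '#')))
            if text ≠ "" then some text else result
          else result)
      none

-- ===== PRECONDITION & SPEC =====
def Spec_get_content_heading_context_py (lines : List String) (line_num : Int) (out : Option String) : Prop := out = get_content_heading_context_py_alt lines line_num
instance (lines : List String) (line_num : Int) (out : Option String) : Decidable (Spec_get_content_heading_context_py lines line_num out) := by unfold Spec_get_content_heading_context_py; infer_instance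

-- ===== CLAIM (what is proved, stated in full; the proofs are below) =====
def Claim_equal_get_content_heading_context_py : Prop := ∀ (lines : List String) (line_num : Int), Dom_get_content_heading_context_py lines line_num → Spec_get_content_heading_context_py lines line_num (get_content_heading_context_py lines line_num)

-- ===== LEMMAS AND PROOFS =====

-- the per-line heading extraction both loops perform
def pvHead (l0 : String) : Option String :=
  let line := PySem.Str.strip l0
  if PySem.Str.startswith line "#" then
    let h := PySem.Str.strip (String.mk (line.toList.dropWhile (· == '#')))
    if h ≠ "" then some h else none
  else none

lemma aGo_succ (lines : List String) (k : Nat) (l0 : String)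
    (h : PySem.List.pyGet? lines (k : Int) = some l0) :
    aGo lines (k + 1) = match pvHead l0 with | some t => some t | none => aGo lines k := by
  simp only [aGo, h, pvHead]
  split_ifs with h1 h2 <;> simp

lemma foldl_eq_aGo (lines : List String) (k : Nat) (hk : k ≤ lines.length) :
    (List.range k).foldl
      (fun result (i : Nat) =>
        match PySem.List.pyGet? lines ((i : Nat) : Int) with
        | none => result
        | some l0 =>
          let s := PySem.Str.strip l0
          if PySem.Str.startswith s "#" then
            let text := PySem.Str.strip (String.mk (s.toList.dropWhile (· == '#')))
            if text ≠ "" then some text else result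
          else result)
      none = aGo lines k := by
  induction k with
  | zero => simp [aGo]
  | succ k ih =>
    have hklt : k < lines.length := hk
    have hget : PySem.List.pyGet? lines (k : Int) = some lines[k] :=
      PySem.List.pyGet?_ofNat lines k hklt
    rw [List.range_succ, List.foldl_append, ih (Nat.le_of_lt hklt),
        aGo_succ lines k lines[k] hget]
    simp only [List.foldl_cons, List.foldl_nil, hget, pvHead]
    split_ifs with h1 h2 <;> simp

-- ===== VERDICT (by name: the statement is the Claim_ definition above) =====
theorem get_content_heading_context_py_spec : Claim_equal_get_content_heading_context_py := by
  intro lines line_num _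
  unfold Spec_get_content_heading_context_py get_content_heading_context_py get_content_heading_context_py_alt
  split_ifs with h
  · rfl
  · push_neg at h
    have hk : line_num.toNat ≤ lines.length := by omega
    exact (foldl_eq_aGo lines line_num.toNat hk).symm
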